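-- pv_equiv track=rewrite | github.com/Hack998/Code | main.py | xor
-- ===== SOURCE A (Python) =====
-- def xor(input_list):
--     resultado = None
--     for o in input_list:
--         if o is not None:
--             if resultado is None:
--                 resultado = o
--             else:
--                 resultado ^= o
--
--     return resultado
-- ===== SOURCE B (Python) =====
-- def xor(input_list):
--     def merge(a, b):
--         if a is None:
--             return b
--         if b is None:
--             return a
--         return a ^ b
--
--     n = len(input_list)
--     if n == 0:
--         return None
--     if n == 1:
--         return input_list[0]
--     mid = n // 2
--     return merge(xor(input_list[:mid]), xor(input_list[mid:]))
-- ===== Notes on version B (the rewrite author's own statement) =====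
-- stated objective: alternative
-- what changed: Replaces A's single linear pass with a guarded Option accumulator by a recursive divide-and-conquer: split the list in halves, recurse on each, and combine the two optional results with an Option-aware XOR merge (correct because XOR is associative).
import Mathlib
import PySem

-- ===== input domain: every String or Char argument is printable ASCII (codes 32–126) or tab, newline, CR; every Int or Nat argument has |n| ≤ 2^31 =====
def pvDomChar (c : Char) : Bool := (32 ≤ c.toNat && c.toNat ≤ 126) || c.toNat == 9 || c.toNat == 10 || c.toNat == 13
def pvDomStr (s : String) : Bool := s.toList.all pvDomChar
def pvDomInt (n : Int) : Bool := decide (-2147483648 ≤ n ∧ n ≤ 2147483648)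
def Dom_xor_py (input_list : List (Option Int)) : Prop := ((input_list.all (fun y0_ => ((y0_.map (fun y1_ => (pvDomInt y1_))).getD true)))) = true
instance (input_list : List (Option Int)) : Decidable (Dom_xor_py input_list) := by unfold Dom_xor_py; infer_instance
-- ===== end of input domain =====

-- B replaces A's linear guarded-accumulator pass by a divide-and-conquer recursion
-- (halve, recurse, merge the optional results with XOR); objective: alternative.

-- ===== PORT A =====
def xor_py (input_list : List (Option Int)) : Option Int :=
  input_list.foldl (fun resultado o =>
    match o with
    | none => resultado
    | some v =>
      match resultado with
      | none => some v
      | some r => some (PySem.Int.bxor r v)) none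

-- ===== PORT B =====
-- Source B's merge helper
def xor_merge (a b : Option Int) : Option Int :=
  match a with
  | none => b
  | some x =>
    match b with
    | none => some x
    | some y => some (PySem.Int.bxor x y)

-- slices input_list[:mid] / input_list[mid:] with 0 ≤ mid ≤ n are exactly take/drop
def xor_py_alt (input_list : List (Option Int)) : Option Int :=
  match input_list with
  | [] => none
  | [x] => x
  | a :: b :: rest =>
    let mid := (a :: b :: rest).length / 2
    xor_merge (xor_py_alt ((a :: b :: rest).take mid))
              (xor_py_alt ((a :: b :: rest).drop mid))
termination_by input_list.length
decreasing_by
  · simp; omega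
  · simp; omega

-- ===== PRECONDITION & SPEC =====
def Spec_xor_py (input_list : List (Option Int)) (out : Option Int) : Prop := out = xor_py_alt input_list
instance (input_list : List (Option Int)) (out : Option Int) : Decidable (Spec_xor_py input_list out) := by unfold Spec_xor_py; infer_instance

-- ===== CLAIM (what is proved, stated in full; the proofs are below) =====
def Claim_equal_xor_py : Prop := ∀ (input_list : List (Option Int)), Dom_xor_py input_list → Spec_xor_py input_list (xor_py input_list)

-- ===== LEMMAS AND PROOFS =====

-- sign/magnitude encoding that turns PySem.Int.bxor into componentwise Bool.xor / Nat.xor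
def pvEnc (a : Int) : Bool × Nat := if 0 ≤ a then (false, a.toNat) else (true, (-a - 1).toNat)
def pvDec (p : Bool × Nat) : Int := if p.1 then -(p.2 : Int) - 1 else (p.2 : Int)

theorem pvEnc_dec (p : Bool × Nat) : pvEnc (pvDec p) = p := by
  unfold pvEnc pvDec
  obtain ⟨s, n⟩ := p
  cases s with
  | false => simp
  | true =>
    simp
    omega

theorem bxor_enc (a b : Int) :
    PySem.Int.bxor a b = pvDec (xor (pvEnc a).1 (pvEnc b).1, (pvEnc a).2 ^^^ (pvEnc b).2) := by
  unfold PySem.Int.bxor pvEnc pvDec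
  split_ifs <;> simp_all

theorem bxor_assoc (a b c : Int) :
    PySem.Int.bxor (PySem.Int.bxor a b) c = PySem.Int.bxor a (PySem.Int.bxor b c) := by
  rw [bxor_enc a b, bxor_enc b c, bxor_enc _ c, bxor_enc a, pvEnc_dec, pvEnc_dec]
  simp [Nat.xor_assoc]

theorem xor_merge_assoc (a b c : Option Int) :
    xor_merge (xor_merge a b) c = xor_merge a (xor_merge b c) := by
  cases a <;> cases b <;> cases c <;> simp [xor_merge, bxor_assoc]

-- A's loop started from acc equals merging acc with A's loop started from none
theorem xor_py_foldl_merge (l : List (Option Int)) (acc : Option Int) :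
    l.foldl (fun resultado o =>
      match o with
      | none => resultado
      | some v =>
        match resultado with
        | none => some v
        | some r => some (PySem.Int.bxor r v)) acc
      = xor_merge acc (xor_py l) := by
  induction l generalizing acc with
  | nil => cases acc <;> rfl
  | cons o t ih =>
    cases o with
    | none =>
      simp only [List.foldl_cons]
      rw [ih]
      have : xor_py (none :: t) = xor_py t := by
        simp [xor_py]
      rw [this]
    | some v =>
      simp only [List.foldl_cons]
      rw [ih]
      have h2 : xor_py (some v :: t) =
          t.foldl (fun resultado o =>
            match o with
            | none => resultado
            | some v =>
              match resultado with
              | none => some v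
              | some r => some (PySem.Int.bxor r v)) (some v) := by
        simp [xor_py]
      rw [h2, ih (some v)]
      cases acc with
      | none => rfl
      | some r => simpa [xor_merge] using xor_merge_assoc (some r) (some v) (xor_py t)

theorem xor_py_append (l1 l2 : List (Option Int)) :
    xor_py (l1 ++ l2) = xor_merge (xor_py l1) (xor_py l2) := by
  unfold xor_py
  rw [List.foldl_append]
  exact xor_py_foldl_merge l2 _

-- ===== VERDICT (by name: the statement is the Claim_ definition above) =====
theorem xor_py_eq_alt (l : List (Option Int)) : xor_py l = xor_py_alt l := by
  induction l using xor_py_alt.induct with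
  | case1 => rw [xor_py_alt]; rfl
  | case2 x => rw [xor_py_alt]; cases x <;> rfl
  | case3 a b rest mid ih1 ih2 =>
    rw [xor_py_alt]
    rw [← ih1, ← ih2, ← xor_py_append, List.take_append_drop]

theorem xor_py_spec : Claim_equal_xor_py := by
  intro input_list _
  exact xor_py_eq_alt input_list
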